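-- pv_equiv track=rewrite | github.com/amingclawdev/aming-claw | agent/governance/graph_generator.py | _is_test_file
-- ===== SOURCE A (Python) =====
-- _TEST_PATTERNS_GO = ("_test.go",)
--
-- _TEST_PATTERNS_TS = (".test.ts", ".test.tsx", ".test.js", ".test.jsx", ".spec.ts", ".spec.js")
--
-- def _is_test_file(filename: str) -> bool:
--     """Check if a file is a test file by naming convention."""
--     lower = filename.lower()
--     if lower.startswith("test_") and lower.endswith(".py"):
--         return True
--     for pat in _TEST_PATTERNS_GO + _TEST_PATTERNS_TS:
--         if lower.endswith(pat):
--             return True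
--     if lower.endswith("_test.py"):
--         return True
--     return False
-- ===== SOURCE B (Python) =====
-- def _is_test_file(filename: str) -> bool:
--     """Check if a file is a test file by naming convention."""
--     lower = filename.lower()
--     stem, sep, ext = lower.rpartition(".")
--     if not sep:
--         return False
--     if ext == "py":
--         return stem.startswith("test_") or stem.endswith("_test")
--     if ext == "go":
--         return stem.endswith("_test")
--     if ext in ("ts", "js"):
--         return stem.endswith(".test") or stem.endswith(".spec")
--     if ext in ("tsx", "jsx"):
--         return stem.endswith(".test")
--     return False
-- ===== Notes on version B (the rewrite author's own statement) =====
-- stated objective: alternative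
-- what changed: Instead of testing the lowered name against ten independent prefix/suffix patterns, B splits it once at the last dot (rpartition) and dispatches on the extension, checking only the stem conditions relevant to that extension.
import Mathlib
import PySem

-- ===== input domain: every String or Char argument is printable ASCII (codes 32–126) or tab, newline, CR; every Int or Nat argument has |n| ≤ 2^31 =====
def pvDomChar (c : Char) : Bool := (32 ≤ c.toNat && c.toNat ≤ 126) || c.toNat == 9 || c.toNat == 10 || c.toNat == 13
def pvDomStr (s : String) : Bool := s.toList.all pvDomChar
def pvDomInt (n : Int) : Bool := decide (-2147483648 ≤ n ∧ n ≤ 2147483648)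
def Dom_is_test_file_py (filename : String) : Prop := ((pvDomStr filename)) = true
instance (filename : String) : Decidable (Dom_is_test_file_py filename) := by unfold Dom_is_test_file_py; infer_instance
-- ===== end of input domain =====

-- B replaces A's repeated suffix scans by one rpartition at the last dot and a dispatch on the extension (objective: alternative).

-- ===== PORT A =====
-- the two pattern tuples, concatenated as in the for-loop
def pvPatterns : List (List Char) :=
  [['_','t','e','s','t','.','g','o'],
   ['.','t','e','s','t','.','t','s'], ['.','t','e','s','t','.','t','s','x'],
   ['.','t','e','s','t','.','j','s'], ['.','t','e','s','t','.','j','s','x'],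
   ['.','s','p','e','c','.','t','s'], ['.','s','p','e','c','.','j','s']]

def is_test_file_py (filename : String) : Bool :=
  let lower := PySem.Chars.lower filename.toList
  if PySem.Chars.startswith lower ['t','e','s','t','_'] && PySem.Chars.endswith lower ['.','p','y'] then
    true
  else if pvPatterns.any (fun pat => PySem.Chars.endswith lower pat) then  -- for-loop with early return
    true
  else if PySem.Chars.endswith lower ['_','t','e','s','t','.','p','y'] then
    true
  else
    false

-- ===== PORT B =====
-- hand port of lower.rpartition("."): split at the LAST '.' into (stem, ext);
-- none exactly when "." is absent (Python returns sep = "" there and Source B returns False).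
def pvRpartitionDot (cs : List Char) : Option (List Char × List Char) :=
  let r := cs.reverse
  let extRev := r.takeWhile (fun c => c ≠ '.')
  if extRev.length = r.length then none
  else some ((r.drop (extRev.length + 1)).reverse, extRev.reverse)

def is_test_file_py_alt (filename : String) : Bool :=
  let lower := PySem.Chars.lower filename.toList
  match pvRpartitionDot lower with
  | none => false
  | some (stem, ext) =>
    if ext = ['p','y'] then
      PySem.Chars.startswith stem ['t','e','s','t','_'] || PySem.Chars.endswith stem ['_','t','e','s','t']
    else if ext = ['g','o'] then
      PySem.Chars.endswith stem ['_','t','e','s','t']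
    else if ext = ['t','s'] ∨ ext = ['j','s'] then
      PySem.Chars.endswith stem ['.','t','e','s','t'] || PySem.Chars.endswith stem ['.','s','p','e','c']
    else if ext = ['t','s','x'] ∨ ext = ['j','s','x'] then
      PySem.Chars.endswith stem ['.','t','e','s','t']
    else
      false

-- ===== PRECONDITION & SPEC =====
def Spec_is_test_file_py (filename : String) (out : Bool) : Prop := out = is_test_file_py_alt filename
instance (filename : String) (out : Bool) : Decidable (Spec_is_test_file_py filename out) := by unfold Spec_is_test_file_py; infer_instance

-- ===== CLAIM (what is proved, stated in full; the proofs are below) =====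
def Claim_equal_is_test_file_py : Prop := ∀ (filename : String), Dom_is_test_file_py filename → Spec_is_test_file_py filename (is_test_file_py filename)

-- ===== LEMMAS AND PROOFS =====

-- a dot-free prefix pattern ignores everything from the first dot on
theorem prefix_dotfree_append (p : List Char) (hp : '.' ∉ p) :
    ∀ (a b : List Char), (p <+: a ++ '.' :: b) ↔ p <+: a := by
  induction p with
  | nil => intro a b; simp
  | cons c p ih =>
    intro a b
    have hc : c ≠ '.' := fun h => hp (h ▸ List.mem_cons_self)
    have hp' : '.' ∉ p := fun m => hp (List.mem_cons_of_mem _ m)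
    cases a with
    | nil =>
      constructor
      · intro h
        rw [List.nil_append, List.cons_prefix_cons] at h
        exact absurd h.1 hc
      · intro h
        exact absurd (List.eq_nil_of_prefix_nil h) (by simp)
    | cons x a =>
      rw [List.cons_append, List.cons_prefix_cons, List.cons_prefix_cons, ih hp' a b]

-- two dot-free heads before a dot must match exactly
theorem prefix_split (a : List Char) (ha : '.' ∉ a) :
    ∀ (b x y : List Char), '.' ∉ b →
      ((a ++ '.' :: x) <+: (b ++ '.' :: y) ↔ a = b ∧ x <+: y) := by
  induction a with
  | nil =>
    intro b x y hb
    cases b with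
    | nil =>
      rw [List.nil_append, List.nil_append, List.cons_prefix_cons]
      simp
    | cons e es =>
      have he : e ≠ '.' := fun h => hb (h ▸ List.mem_cons_self)
      rw [List.nil_append, List.cons_append, List.cons_prefix_cons]
      constructor
      · rintro ⟨h, -⟩; exact absurd h.symm he
      · rintro ⟨h, -⟩; exact absurd h (by simp)
  | cons c a ih =>
    intro b x y hb
    have hc : c ≠ '.' := fun h => ha (h ▸ List.mem_cons_self)
    have ha' : '.' ∉ a := fun m => ha (List.mem_cons_of_mem _ m)
    cases b with
    | nil =>
      rw [List.cons_append, List.nil_append, List.cons_prefix_cons]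
      simp [hc]
    | cons e es =>
      have hb' : '.' ∉ es := fun m => hb (List.mem_cons_of_mem _ m)
      rw [List.cons_append, List.cons_append, List.cons_prefix_cons, ih ha' es x y hb']
      constructor
      · rintro ⟨rfl, rfl, h⟩; exact ⟨rfl, h⟩
      · rintro ⟨h, h2⟩; cases h; exact ⟨rfl, rfl, h2⟩

-- the first element dropWhile keeps fails the predicate
theorem dropWhile_head_false {α : Type} (p : α → Bool) (c : α) (rest : List α) :
    ∀ r : List α, r.dropWhile p = c :: rest → p c = false := by
  intro r
  induction r with
  | nil => intro h; simp at h
  | cons x xs ih =>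
    intro h
    rw [List.dropWhile_cons] at h
    by_cases hx : p x = true
    · exact ih (by simpa [hx] using h)
    · rw [if_neg (by simp [hx])] at h
      cases h
      simpa using hx

-- endswith against a pattern P ++ "." ++ Q on a string S ++ "." ++ E (Q, E dot-free): extension must equal, stem suffix remains
theorem endswith_split (S E P Q pat : List Char) (hpat : pat = P ++ '.' :: Q)
    (hE : '.' ∉ E) (hQ : '.' ∉ Q) :
    PySem.Chars.endswith (S ++ '.' :: E) pat = (decide (Q = E) && PySem.Chars.endswith S P) := by
  subst hpat
  rcases h : (decide (Q = E) && PySem.Chars.endswith S P) with _ | _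
  · rw [Bool.eq_false_iff]
    intro hc
    have hsuf := (PySem.Chars.endswith_iff _ _).1 hc
    have hpre : (Q.reverse ++ '.' :: P.reverse) <+: (E.reverse ++ '.' :: S.reverse) := by
      have := List.reverse_prefix.2 hsuf
      simpa using this
    rcases (prefix_split Q.reverse (by simpa using hQ) E.reverse P.reverse S.reverse
      (by simpa using hE)).1 hpre with ⟨hqe, hps⟩
    have hQE : Q = E := by
      have := congrArg List.reverse hqe; simpa using this
    have hPS : PySem.Chars.endswith S P = true :=
      (PySem.Chars.endswith_iff _ _).2 (List.reverse_prefix.1 hps)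
    simp [hQE, hPS] at h
  · simp only [Bool.and_eq_true, decide_eq_true_eq] at h
    rcases h with ⟨rfl, hPS⟩
    apply (PySem.Chars.endswith_iff _ _).2
    apply List.reverse_prefix.1
    have hps := List.reverse_prefix.2 ((PySem.Chars.endswith_iff _ _).1 hPS)
    have := (prefix_split Q.reverse (by simpa using hQ) Q.reverse P.reverse S.reverse
      (by simpa using hQ)).2 ⟨rfl, hps⟩
    simpa using this

theorem startswith_split (S E p : List Char) (hp : '.' ∉ p) :
    PySem.Chars.startswith (S ++ '.' :: E) p = PySem.Chars.startswith S p := by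
  rcases h : PySem.Chars.startswith S p with _ | _
  · rw [Bool.eq_false_iff]
    intro hc
    have := (prefix_dotfree_append p hp S E).1 ((PySem.Chars.startswith_iff _ _).1 hc)
    rw [Bool.eq_false_iff] at h
    exact h ((PySem.Chars.startswith_iff _ _).2 this)
  · exact (PySem.Chars.startswith_iff _ _).2 ((prefix_dotfree_append p hp S E).2
      ((PySem.Chars.startswith_iff _ _).1 h))

theorem endswith_no_dot (L p : List Char) (hL : '.' ∉ L) (hp : '.' ∈ p) :
    PySem.Chars.endswith L p = false := by
  rw [Bool.eq_false_iff]
  intro hc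
  exact hL (((PySem.Chars.endswith_iff _ _).1 hc).subset hp)

-- core equality, for an arbitrary (already lowered) character list
theorem core_eq (L : List Char) :
    (if PySem.Chars.startswith L ['t','e','s','t','_'] && PySem.Chars.endswith L ['.','p','y'] then
      true
    else if pvPatterns.any (fun pat => PySem.Chars.endswith L pat) then true
    else if PySem.Chars.endswith L ['_','t','e','s','t','.','p','y'] then true
    else false) =
    (match pvRpartitionDot L with
    | none => false
    | some (stem, ext) =>
      if ext = ['p','y'] then
        PySem.Chars.startswith stem ['t','e','s','t','_'] || PySem.Chars.endswith stem ['_','t','e','s','t']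
      else if ext = ['g','o'] then
        PySem.Chars.endswith stem ['_','t','e','s','t']
      else if ext = ['t','s'] ∨ ext = ['j','s'] then
        PySem.Chars.endswith stem ['.','t','e','s','t'] || PySem.Chars.endswith stem ['.','s','p','e','c']
      else if ext = ['t','s','x'] ∨ ext = ['j','s','x'] then
        PySem.Chars.endswith stem ['.','t','e','s','t']
      else
        false) := by
  by_cases hdot : '.' ∈ L
  · -- there is a dot: decompose L at the LAST dot
    set r := L.reverse with hr
    have hdr : '.' ∈ r := by simpa [hr] using hdot
    set extRev := r.takeWhile (fun c => c ≠ '.') with hext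
    have hfree : ∀ c ∈ extRev, c ≠ '.' := by
      intro c hc
      simpa using List.mem_takeWhile_imp hc
    have hlen : extRev.length ≠ r.length := by
      intro hl
      have : extRev = r := (List.takeWhile_prefix _).eq_of_length hl
      exact hfree '.' (this ▸ hdr) rfl
    have hsplit := List.takeWhile_append_dropWhile (p := fun c => c ≠ '.') (l := r)
    rcases hd : r.dropWhile (fun c => c ≠ '.') with _ | ⟨c, rest⟩
    · exfalso
      apply hlen
      have : r = extRev := by rw [← hsplit, hd, List.append_nil, hext]
      rw [this]
    · have hc : c = '.' := by
        have := dropWhile_head_false _ c rest r hd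
        simp at this
        exact this
      have hrdec : r = extRev ++ '.' :: rest := by
        rw [← hsplit, hd, hc, hext]
      have hdrop : r.drop (extRev.length + 1) = rest := by
        rw [hrdec]
        rw [show extRev ++ '.' :: rest = (extRev ++ ['.']) ++ rest by simp]
        have h := List.drop_left (l₁ := extRev ++ ['.']) (l₂ := rest)
        simp only [List.length_append, List.length_cons, List.length_nil] at h
        exact h
      have hLdec : L = rest.reverse ++ '.' :: extRev.reverse := by
        have h := congrArg List.reverse hrdec
        rw [hr, List.reverse_reverse] at h
        rw [h]
        simp
      set S := rest.reverse
      set E := extRev.reverse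
      have hEfree : '.' ∉ E := by
        intro hm
        exact hfree '.' (by simpa [E] using hm) rfl
      -- B reduces to the dispatch on (S, E)
      have hB : pvRpartitionDot L = some (S, E) := by
        simp only [pvRpartitionDot]
        rw [← hr, ← hext]
        rw [if_neg hlen, hdrop]
      rw [hB, hLdec]
      -- rewrite every A-side primitive through the decomposition
      have hnil : PySem.Chars.endswith S [] = true :=
        (PySem.Chars.endswith_iff _ _).2 List.nil_suffix
      simp only [pvPatterns, List.any_cons, List.any_nil,
        startswith_split S E ['t','e','s','t','_'] (by decide),
        endswith_split S E [] ['p','y'] ['.','p','y'] rfl hEfree (by decide),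
        endswith_split S E ['_','t','e','s','t'] ['p','y'] ['_','t','e','s','t','.','p','y'] rfl hEfree (by decide),
        endswith_split S E ['_','t','e','s','t'] ['g','o'] ['_','t','e','s','t','.','g','o'] rfl hEfree (by decide),
        endswith_split S E ['.','t','e','s','t'] ['t','s'] ['.','t','e','s','t','.','t','s'] rfl hEfree (by decide),
        endswith_split S E ['.','t','e','s','t'] ['t','s','x'] ['.','t','e','s','t','.','t','s','x'] rfl hEfree (by decide),
        endswith_split S E ['.','t','e','s','t'] ['j','s'] ['.','t','e','s','t','.','j','s'] rfl hEfree (by decide),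
        endswith_split S E ['.','t','e','s','t'] ['j','s','x'] ['.','t','e','s','t','.','j','s','x'] rfl hEfree (by decide),
        endswith_split S E ['.','s','p','e','c'] ['t','s'] ['.','s','p','e','c','.','t','s'] rfl hEfree (by decide),
        endswith_split S E ['.','s','p','e','c'] ['j','s'] ['.','s','p','e','c','.','j','s'] rfl hEfree (by decide),
        hnil]
      by_cases h1 : E = ['p','y']
      · simp [h1]
      · by_cases h2 : E = ['g','o']
        · simp [h2]
        · by_cases h3 : E = ['t','s']
          · simp [h3]
          · by_cases h4 : E = ['j','s']
            · simp [h4]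
            · by_cases h5 : E = ['t','s','x']
              · simp [h5]
              · by_cases h6 : E = ['j','s','x']
                · simp [h6]
                · have g1 : ¬(['p','y'] = E) := fun h => h1 h.symm
                  have g2 : ¬(['g','o'] = E) := fun h => h2 h.symm
                  have g3 : ¬(['t','s'] = E) := fun h => h3 h.symm
                  have g4 : ¬(['j','s'] = E) := fun h => h4 h.symm
                  have g5 : ¬(['t','s','x'] = E) := fun h => h5 h.symm
                  have g6 : ¬(['j','s','x'] = E) := fun h => h6 h.symm
                  simp [h1, h2, h3, h4, h5, h6, g1, g2, g3, g4, g5, g6]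
  · -- no dot at all: both sides are false
    have hB : pvRpartitionDot L = none := by
      simp only [pvRpartitionDot]
      rw [if_pos]
      congr 1
      rw [List.takeWhile_eq_self_iff]
      intro c hc
      simp only [ne_eq, decide_eq_true_eq]
      rintro rfl
      exact hdot (by simpa using hc)
    rw [hB]
    have hno : ∀ p : List Char, '.' ∈ p → PySem.Chars.endswith L p = false :=
      fun p hp => endswith_no_dot L p hdot hp
    simp only [pvPatterns, List.any_cons, List.any_nil,
      hno ['.','p','y'] (by decide), hno ['_','t','e','s','t','.','p','y'] (by decide),
      hno ['_','t','e','s','t','.','g','o'] (by decide),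
      hno ['.','t','e','s','t','.','t','s'] (by decide),
      hno ['.','t','e','s','t','.','t','s','x'] (by decide),
      hno ['.','t','e','s','t','.','j','s'] (by decide),
      hno ['.','t','e','s','t','.','j','s','x'] (by decide),
      hno ['.','s','p','e','c','.','t','s'] (by decide),
      hno ['.','s','p','e','c','.','j','s'] (by decide)]
    simp

-- ===== VERDICT (by name: the statement is the Claim_ definition above) =====
theorem is_test_file_py_spec : Claim_equal_is_test_file_py := by
  intro filename _
  unfold Spec_is_test_file_py is_test_file_py is_test_file_py_alt
  exact core_eq (PySem.Chars.lower filename.toList)
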